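-- pv_equiv track=rewrite | github.com/vitaldb/openecg | ecgcode/stage2/infer.py | extract_boundaries
-- ===== SOURCE A (Python) =====
-- def extract_boundaries(frames, fs=250, frame_ms=20):
--     """Extract per-wave boundary sample indices from a per-frame supercategory array.
--
--     Returns dict: {p_on, p_off, qrs_on, qrs_off, t_on, t_off} -> list[int sample idx].
--     Boundaries reflect the model's raw frame transitions with no shift applied.
--     """
--     out = {"p_on": [], "p_off": [], "qrs_on": [], "qrs_off": [], "t_on": [], "t_off": []}
--     super_to_name = {1: "p", 2: "qrs", 3: "t"}  # SUPER_P, SUPER_QRS, SUPER_T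
--     spf = int(round(frame_ms * fs / 1000.0))
--     prev = 0
--     for f_idx, cur in enumerate(frames):
--         cur = int(cur)
--         if cur != prev:
--             sample = f_idx * spf
--             if prev in super_to_name:
--                 out[f"{super_to_name[prev]}_off"].append(int(sample - 1))
--             if cur in super_to_name:
--                 out[f"{super_to_name[cur]}_on"].append(int(sample))
--         prev = cur
--     if prev in super_to_name:
--         sample = len(frames) * spf
--         out[f"{super_to_name[prev]}_off"].append(int(sample - 1))
--     return out
-- ===== SOURCE B (Python) =====
-- def extract_boundaries(frames, fs=250, frame_ms=20):
--     """Runs-then-emit re-implementation: first collapse frames into contiguous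
--     runs of equal category (category, start index), then emit one on/off pair
--     per named run, the off coming from the next run's start (or len(frames))."""
--     spf = int(round(frame_ms * fs / 1000.0))
--     names = {1: "p", 2: "qrs", 3: "t"}
--     runs = []          # (category, start frame index) of each contiguous run
--     prev = None
--     for i, f in enumerate(frames):
--         c = int(f)
--         if c != prev:
--             runs.append((c, i))
--             prev = c
--     ends = [s for _, s in runs[1:]] + [len(frames)]
--     out = {"p_on": [], "p_off": [], "qrs_on": [], "qrs_off": [], "t_on": [], "t_off": []}
--     for (c, s), e in zip(runs, ends):
--         if c in names:
--             out[names[c] + "_on"].append(s * spf)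
--             out[names[c] + "_off"].append(e * spf - 1)
--     return out
-- ===== Notes on version B (the rewrite author's own statement) =====
-- stated objective: alternative
-- what changed: B first collapses the frame array into a list of contiguous (category, start) runs and then emits each named run's on/off pair from the run's start and the next run's start (or len(frames)), replacing A's per-frame prev-comparison loop with its trailing off special case.
import Mathlib
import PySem

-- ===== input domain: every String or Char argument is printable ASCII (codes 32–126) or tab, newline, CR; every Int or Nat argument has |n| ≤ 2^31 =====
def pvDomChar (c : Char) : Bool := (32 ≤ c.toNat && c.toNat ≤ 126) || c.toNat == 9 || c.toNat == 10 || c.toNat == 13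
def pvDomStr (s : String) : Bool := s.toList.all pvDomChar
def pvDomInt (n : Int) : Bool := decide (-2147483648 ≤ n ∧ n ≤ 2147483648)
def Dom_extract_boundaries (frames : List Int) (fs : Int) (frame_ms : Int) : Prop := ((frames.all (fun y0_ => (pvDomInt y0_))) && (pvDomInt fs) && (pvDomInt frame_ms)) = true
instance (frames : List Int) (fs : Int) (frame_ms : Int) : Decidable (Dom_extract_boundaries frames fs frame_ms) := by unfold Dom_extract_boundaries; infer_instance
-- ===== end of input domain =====

-- B re-groups the frames into contiguous runs first and emits one on/off pair per
-- named run (objective: alternative decomposition, same cost); return value only.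

-- ===== PORT A =====
-- exact integer model of CPython's `int(round(n / 1000.0))` for int n (shared by both
-- Pythons verbatim): fl(n) then correctly-rounded IEEE division by 1000.0, then round();
-- all three roundings are round-half-to-even, modelled exactly with integer arithmetic.
def pvRne (num den : Nat) : Nat :=
  let q := num / den
  let r := num % den
  if 2 * r < den then q else if den < 2 * r then q + 1 else if q % 2 = 0 then q else q + 1

def pvBitLen (a : Nat) : Nat := if a = 0 then 0 else Nat.log2 a + 1

def pvGe (a : Nat) (k : Int) : Bool :=
  if 0 ≤ k then decide (1000 * 2 ^ k.toNat ≤ a) else decide (1000 ≤ a * 2 ^ (-k).toNat)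

def pvSpfNat (a0 : Nat) : Nat :=
  if a0 = 0 then 0 else
  let bl := pvBitLen a0
  let a := if 53 < bl then (pvRne a0 (2 ^ (bl - 53))) * 2 ^ (bl - 53) else a0
  let k0 : Int := (pvBitLen a : Int) - 11
  let k := if pvGe a (k0 + 1) then k0 + 1 else k0
  let e := k - 52
  let m := if 0 ≤ e then pvRne a (1000 * 2 ^ e.toNat) else pvRne (a * 2 ^ (-e).toNat) 1000
  if 0 ≤ e then m * 2 ^ e.toNat else pvRne m (2 ^ (-e).toNat)

def pvSpf (n : Int) : Int := if 0 ≤ n then (pvSpfNat n.toNat : Int) else -(pvSpfNat (-n).toNat : Int)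

-- super_to_name lookup: `c in super_to_name` / `super_to_name[c]`
def pvName (c : Int) : Option String :=
  if c = 1 then some "p" else if c = 2 then some "qrs" else if c = 3 then some "t" else none

def pvD0 : PySem.Dict String (List Int) :=
  PySem.Dict.ofList [("p_on", []), ("p_off", []), ("qrs_on", []), ("qrs_off", []), ("t_on", []), ("t_off", [])]

-- A's loop body: state (out, prev), item (f_idx, cur)
def pvStepA (spf : Int) (st : PySem.Dict String (List Int) × Int) (p : Int × Int) :
    PySem.Dict String (List Int) × Int :=
  if p.2 ≠ st.2 then
    let sample := p.1 * spf
    let d1 := match pvName st.2 with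
      | some n => st.1.modify (n ++ "_off") [] (· ++ [sample - 1])
      | none => st.1
    let d2 := match pvName p.2 with
      | some n => d1.modify (n ++ "_on") [] (· ++ [sample])
      | none => d1
    (d2, p.2)
  else (st.1, p.2)

def extract_boundaries (frames : List Int) (fs : Int) (frame_ms : Int) : List (String × List Int) :=
  let spf := pvSpf (frame_ms * fs)
  let r := (PySem.List.enumerate frames 0).foldl (pvStepA spf) (pvD0, 0)
  let d := match pvName r.2 with
    | some n => r.1.modify (n ++ "_off") [] (· ++ [(frames.length : Int) * spf - 1])
    | none => r.1
  d.items

-- ===== PORT B =====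
-- run collection: state (runs, prev), item (i, f)
def pvStepR (st : List (Int × Int) × Option Int) (p : Int × Int) : List (Int × Int) × Option Int :=
  if some p.2 ≠ st.2 then (st.1 ++ [(p.2, p.1)], some p.2) else st

-- emission: item ((c, s), e)
def pvStepE (spf : Int) (d : PySem.Dict String (List Int)) (q : (Int × Int) × Int) :
    PySem.Dict String (List Int) :=
  match pvName q.1.1 with
  | some n => (d.modify (n ++ "_on") [] (· ++ [q.1.2 * spf])).modify (n ++ "_off") [] (· ++ [q.2 * spf - 1])
  | none => d

def extract_boundaries_alt (frames : List Int) (fs : Int) (frame_ms : Int) : List (String × List Int) :=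
  let spf := pvSpf (frame_ms * fs)
  let runs := ((PySem.List.enumerate frames 0).foldl pvStepR ([], none)).1
  let ends := ((runs.drop 1).map (·.2)) ++ [(frames.length : Int)]
  ((runs.zip ends).foldl (pvStepE spf) pvD0).items

-- ===== PRECONDITION & SPEC =====
def Spec_extract_boundaries (frames : List Int) (fs : Int) (frame_ms : Int) (out : List (String × List Int)) : Prop := out = extract_boundaries_alt frames fs frame_ms
instance (frames : List Int) (fs : Int) (frame_ms : Int) (out : List (String × List Int)) : Decidable (Spec_extract_boundaries frames fs frame_ms out) := by unfold Spec_extract_boundaries; infer_instance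

-- ===== CLAIM (what is proved, stated in full; the proofs are below) =====
def Claim_equal_extract_boundaries : Prop := ∀ (frames : List Int) (fs : Int) (frame_ms : Int), Dom_extract_boundaries frames fs frame_ms → Spec_extract_boundaries frames fs frame_ms (extract_boundaries frames fs frame_ms)

-- ===== LEMMAS AND PROOFS =====

-- event streams: (key, value) append events, applied left to right
def pvApp (d : PySem.Dict String (List Int)) (evs : List (String × Int)) : PySem.Dict String (List Int) :=
  evs.foldl (fun d e => d.modify e.1 [] (· ++ [e.2])) d

def pvEvOff (p : Int) (x : Int) : List (String × Int) :=
  match pvName p with | some n => [(n ++ "_off", x - 1)] | none => []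

def pvEvOn (c : Int) (x : Int) : List (String × Int) :=
  match pvName c with | some n => [(n ++ "_on", x)] | none => []

def pvLoopEv (s i prev : Int) : List Int → List (String × Int)
  | [] => []
  | c :: rest => (if c ≠ prev then pvEvOff prev (i * s) ++ pvEvOn c (i * s) else []) ++ pvLoopEv s (i + 1) c rest

def pvLast (prev : Int) : List Int → Int
  | [] => prev
  | c :: rest => pvLast c rest

def pvGroupEv (s i prev : Int) : List Int → List (String × Int)
  | [] => pvEvOff prev (i * s)
  | c :: rest => (if c ≠ prev then pvEvOff prev (i * s) ++ pvEvOn c (i * s) else []) ++ pvGroupEv s (i + 1) c rest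

def pvRunsRec (prev : Option Int) (i : Int) : List Int → List (Int × Int)
  | [] => []
  | c :: rest => if some c ≠ prev then (c, i) :: pvRunsRec (some c) (i + 1) rest else pvRunsRec prev (i + 1) rest

def pvLastO (prev : Option Int) : List Int → Option Int
  | [] => prev
  | c :: rest => pvLastO (some c) rest

def pvNextStart (rs : List (Int × Int)) (e : Int) : Int :=
  match rs with | [] => e | (_, st) :: _ => st

def pvZEv (s e : Int) : List (Int × Int) → List (String × Int)
  | [] => []
  | (c, st) :: rest => (pvEvOn c (st * s) ++ pvEvOff c ((pvNextStart rest e) * s)) ++ pvZEv s e rest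

def pvNextChange (p i : Int) : List Int → Int
  | [] => i
  | c :: rest => if c ≠ p then i else pvNextChange p (i + 1) rest

theorem pvApp_append (d : PySem.Dict String (List Int)) (e1 e2 : List (String × Int)) :
    pvApp d (e1 ++ e2) = pvApp (pvApp d e1) e2 := by
  simp [pvApp, List.foldl_append]

theorem pvStepA_snd (s : Int) (st : PySem.Dict String (List Int) × Int) (p : Int × Int) :
    (pvStepA s st p).2 = p.2 := by
  unfold pvStepA; split <;> rfl

theorem pvApp_evOff (d : PySem.Dict String (List Int)) (p x : Int) :
    pvApp d (pvEvOff p x) =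
      (match pvName p with
       | some n => d.modify (n ++ "_off") [] (· ++ [x - 1])
       | none => d) := by
  cases hp : pvName p <;> simp [pvApp, pvEvOff, hp]

-- A's fold = events
theorem pvFoldA (s : Int) (fr : List Int) : ∀ (i prev : Int) (d : PySem.Dict String (List Int)),
    (PySem.List.enumerate fr i).foldl (pvStepA s) (d, prev) =
      (pvApp d (pvLoopEv s i prev fr), pvLast prev fr) := by
  induction fr with
  | nil => intro i prev d; simp [PySem.List.enumerate_nil, pvLoopEv, pvLast, pvApp]
  | cons c rest ih =>
    intro i prev d
    rw [PySem.List.enumerate_cons]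
    simp only [List.foldl_cons, pvLoopEv, pvLast, pvApp_append]
    have hst : pvStepA s (d, prev) (i, c) = ((pvStepA s (d, prev) (i, c)).1, c) :=
      Prod.ext rfl (pvStepA_snd s (d, prev) (i, c))
    rw [hst, ih]
    congr 2
    by_cases h : c = prev
    · subst h; simp [pvStepA, pvApp]
    · simp only [pvStepA, ne_eq, h, not_false_iff, if_pos]
      cases hp : pvName prev <;> cases hc : pvName c <;>
        simp [pvApp, pvEvOff, pvEvOn, hp, hc]

-- loop events plus the trailing off = grouped events
theorem pvLoopEv_tail (s : Int) (fr : List Int) : ∀ (i prev : Int),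
    pvLoopEv s i prev fr ++ pvEvOff (pvLast prev fr) ((i + fr.length) * s) = pvGroupEv s i prev fr := by
  induction fr with
  | nil => intro i prev; simp [pvLoopEv, pvLast, pvGroupEv]
  | cons c rest ih =>
    intro i prev
    simp only [pvLoopEv, pvLast, pvGroupEv, List.append_assoc, List.length_cons]
    rw [← ih (i + 1) c]
    have : i + ((rest.length + 1 : Nat) : Int) = (i + 1) + rest.length := by push_cast; ring
    rw [this]

-- B's run-collection fold
theorem pvFoldR (fr : List Int) : ∀ (i : Int) (prev : Option Int) (acc : List (Int × Int)),
    (PySem.List.enumerate fr i).foldl pvStepR (acc, prev) =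
      (acc ++ pvRunsRec prev i fr, pvLastO prev fr) := by
  induction fr with
  | nil => intro i prev acc; simp [PySem.List.enumerate_nil, pvRunsRec, pvLastO]
  | cons c rest ih =>
    intro i prev acc
    rw [PySem.List.enumerate_cons, List.foldl_cons]
    by_cases h : some c = prev
    · subst h
      rw [show pvStepR (acc, some c) (i, c) = (acc, some c) from by simp [pvStepR]]
      rw [ih]
      rw [show pvRunsRec (some c) i (c :: rest) = pvRunsRec (some c) (i + 1) rest from by
        simp [pvRunsRec]]
      rfl
    · rw [show pvStepR (acc, prev) (i, c) = (acc ++ [(c, i)], some c) from by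
        simp [pvStepR, h]]
      rw [ih]
      rw [show pvRunsRec prev i (c :: rest) = (c, i) :: pvRunsRec (some c) (i + 1) rest from by
        simp [pvRunsRec, h]]
      simp [pvLastO]

-- B's emission fold = zEv events
theorem pvFoldE (s : Int) (rs : List (Int × Int)) : ∀ (e : Int) (d : PySem.Dict String (List Int)),
    (rs.zip (((rs.drop 1).map (·.2)) ++ [e])).foldl (pvStepE s) d = pvApp d (pvZEv s e rs) := by
  induction rs with
  | nil => intro e d; simp [pvZEv, pvApp]
  | cons hd rest ih =>
    intro e d
    obtain ⟨c, st⟩ := hd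
    have hzip : ((c, st) :: rest).zip ((((c, st) :: rest).drop 1).map (·.2) ++ [e]) =
        ((c, st), pvNextStart rest e) :: rest.zip (((rest.drop 1).map (·.2)) ++ [e]) := by
      cases rest with
      | nil => simp [pvNextStart]
      | cons hd2 tl => simp [pvNextStart, List.zip]
    rw [hzip]
    simp only [List.foldl_cons, pvZEv, pvApp_append]
    rw [ih]
    congr 1
    cases hc : pvName c <;> simp [pvStepE, pvApp, pvEvOn, pvEvOff, hc]

-- the first start after a run of p (or the end) is the first change index
theorem pvNextStart_runsRec (fr : List Int) : ∀ (i p : Int),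
    pvNextStart (pvRunsRec (some p) i fr) (i + fr.length) = pvNextChange p i fr := by
  induction fr with
  | nil => intro i p; simp [pvRunsRec, pvNextStart, pvNextChange]
  | cons c rest ih =>
    intro i p
    simp only [pvRunsRec, pvNextChange, List.length_cons]
    by_cases h : c = p
    · subst h
      rw [if_neg (show ¬(some c ≠ some c) from by simp), if_neg (show ¬(c ≠ c) from by simp)]
      have : i + ((rest.length + 1 : Nat) : Int) = (i + 1) + rest.length := by push_cast; ring
      rw [this, ih]
    · rw [if_pos (show some c ≠ some p from by simpa using h), if_pos (show c ≠ p from h)]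
      simp [pvNextStart]

-- core: grouped events = off-for-pending-run plus run events
theorem pvGroupEv_z (s : Int) (fr : List Int) : ∀ (i p : Int),
    pvGroupEv s i p fr =
      pvEvOff p ((pvNextChange p i fr) * s) ++ pvZEv s (i + fr.length) (pvRunsRec (some p) i fr) := by
  induction fr with
  | nil => intro i p; simp [pvGroupEv, pvNextChange, pvRunsRec, pvZEv]
  | cons c rest ih =>
    intro i p
    have hcast : i + ((rest.length + 1 : Nat) : Int) = (i + 1) + rest.length := by push_cast; ring
    simp only [pvGroupEv, pvNextChange, pvRunsRec, List.length_cons]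
    by_cases h : c = p
    · subst h
      rw [if_neg (show ¬(c ≠ c) from by simp), if_neg (show ¬(some c ≠ some c) from by simp),
        if_neg (show ¬(c ≠ c) from by simp)]
      rw [hcast, ih (i + 1) c]
      simp
    · rw [if_pos (show c ≠ p from h), if_pos (show some c ≠ some p from by simpa using h),
        if_pos (show c ≠ p from h)]
      rw [ih (i + 1) c]
      simp only [pvZEv, List.append_assoc, hcast]
      rw [pvNextStart_runsRec]

-- leading zero-run is invisible to emission
theorem pvZEv_none (s e : Int) (fr : List Int) :
    pvZEv s e (pvRunsRec none 0 fr) = pvZEv s e (pvRunsRec (some 0) 0 fr) := by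
  cases fr with
  | nil => rfl
  | cons c rest =>
    by_cases h : c = 0
    · subst h
      rw [show pvRunsRec none 0 (0 :: rest) = (0, 0) :: pvRunsRec (some 0) 1 rest from by
        simp [pvRunsRec]]
      rw [show pvRunsRec (some 0) 0 (0 :: rest) = pvRunsRec (some 0) 1 rest from by
        simp [pvRunsRec]]
      simp [pvZEv, pvEvOn, pvEvOff, pvName]
    · simp [pvRunsRec, h]

-- ===== VERDICT (by name: the statement is the Claim_ definition above) =====
theorem extract_boundaries_spec : Claim_equal_extract_boundaries := by
  intro frames fs frame_ms _hD
  unfold Spec_extract_boundaries extract_boundaries extract_boundaries_alt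
  simp only [pvFoldA, pvFoldR, pvFoldE, List.nil_append]
  rw [← pvApp_evOff, ← pvApp_append, pvZEv_none]
  have h1 : pvLoopEv (pvSpf (frame_ms * fs)) 0 0 frames ++
      pvEvOff (pvLast 0 frames) ((frames.length : Int) * pvSpf (frame_ms * fs)) =
      pvGroupEv (pvSpf (frame_ms * fs)) 0 0 frames := by
    have := pvLoopEv_tail (pvSpf (frame_ms * fs)) frames 0 0
    simpa using this
  rw [h1, pvGroupEv_z]
  simp [pvEvOff, pvName]
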